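-- pv_equiv track=rewrite | github.com/VaHiX/CodeForces | Python/ByRound/2035/2035_C_Alya_and_Permutation.py | gen_perm
-- ===== SOURCE A (Python) =====
-- def gen_perm(n):
--     # Base case for small n
--     if n == 5:
--         return [2, 1, 3, 4, 5]
--
--     # If n is even
--     if n % 2 == 0:
--         # If n is a power of 2, we recursively get permutation for n-1 and append n
--         if n.bit_count() == 1:
--             ans = gen_perm(n - 1)
--             ans.append(n)
--         else:
--             # Otherwise, compute the highest power of 2 less than n
--             last = (2 ** (len(bin(n)) - 3)) - 1
--             # Generate permutation by excluding 'last' and appending it at the end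
--             ans = [i for i in range(1, n + 1) if i != last]
--             ans.append(last)
--     else:
--         # If n is odd, recursively generate permutation for n-1 and append n
--         ans = gen_perm(n - 1)
--         ans.append(n)
--
--     return ans
-- ===== SOURCE B (Python) =====
-- def _base(m):
--     # base permutation at a stopping index m
--     if m == 5:
--         return [2, 1, 3, 4, 5]
--     last = 2 ** (len(bin(m)) - 3) - 1
--     return list(range(1, last)) + list(range(last + 1, m + 1)) + [last]
--
--
-- def gen_perm(n):
--     # Closed form: A's recursion only strips trailing "append n" steps, so walk down
--     # to the stopping index m, build its base permutation directly, append m+1..n.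
--     m = n
--     while m != 5 and (m % 2 or m.bit_count() == 1):
--         m -= 1
--     return _base(m) + list(range(m + 1, n + 1))
-- ===== Notes on version B (the rewrite author's own statement) =====
-- stated objective: alternative
-- what changed: Replaces A's linear recursion by a closed form: a short descent to the stopping index m, the base permutation of m built directly from two ranges, and the tail m+1..n appended as one range instead of one recursive append per step.
-- outside the precondition, e.g. on gen_perm(-6): A returns [7], B returns [1, 2, 3, 4, 5, 6, 7]; on gen_perm(-1): A returns [7, -5, -4, -3, -2, -1], B returns [1, 2, 3, 4, 5, 6, 7, -5, -4, -3, -2, -1]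
import Mathlib
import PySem

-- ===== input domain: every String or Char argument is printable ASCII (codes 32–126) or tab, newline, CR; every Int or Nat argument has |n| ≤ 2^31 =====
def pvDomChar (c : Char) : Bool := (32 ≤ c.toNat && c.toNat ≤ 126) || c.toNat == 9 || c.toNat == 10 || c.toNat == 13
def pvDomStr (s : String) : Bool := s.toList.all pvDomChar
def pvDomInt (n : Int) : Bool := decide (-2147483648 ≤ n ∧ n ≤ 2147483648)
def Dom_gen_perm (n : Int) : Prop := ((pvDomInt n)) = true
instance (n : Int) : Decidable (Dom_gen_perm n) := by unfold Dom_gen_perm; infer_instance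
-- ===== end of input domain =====

-- B replaces A's recursion by a closed form: a short descent to the stopping index m,
-- m's base permutation built from two ranges, then the tail m+1..n as one range; objective: alternative.

-- Python n.bit_count() = number of 1-bits of |n| (binary digits of |n| are 0/1, so their sum)
def pyBitCount (n : Int) : Nat := (Nat.digits 2 n.natAbs).sum
-- Python len(bin(n)) : "0b"+digits (plus "-"), with "0" for n = 0
def pyBinLen (n : Int) : Nat := (if n < 0 then 3 else 2) + max 1 (Nat.digits 2 n.natAbs).length

-- ===== PORT A =====
-- fuel only bounds the recursion depth; the Python recursion reaches a base case in ≤ n+2 steps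
def gen_permGo : Nat → Int → List Int
  | 0, _ => []
  | f + 1, n =>
    if n = 5 then [2, 1, 3, 4, 5]
    else if n % 2 = 0 then
      if pyBitCount n = 1 then gen_permGo f (n - 1) ++ [n]
      else
        let last : Int := 2 ^ (pyBinLen n - 3) - 1
        (PySem.List.pyRange 1 (n + 1) 1).filter (fun i => i != last) ++ [last]
    else gen_permGo f (n - 1) ++ [n]

def gen_perm (n : Int) : List Int := gen_permGo (n.toNat + 7) n

-- ===== PORT B =====
-- Python _base(m)
def baseList (m : Int) : List Int :=
  if m = 5 then [2, 1, 3, 4, 5]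
  else
    let last : Int := 2 ^ (pyBinLen m - 3) - 1
    PySem.List.pyRange 1 last 1 ++ PySem.List.pyRange (last + 1) (m + 1) 1 ++ [last]

-- the while loop 'while m != 5 and (m % 2 or m.bit_count() == 1): m -= 1'
-- (fuel only bounds the loop; it stops within m+1 steps for 0 ≤ m)
def findBase : Nat → Int → Int
  | 0, m => m
  | f + 1, m =>
    if m ≠ 5 ∧ (m % 2 ≠ 0 ∨ pyBitCount m = 1) then findBase f (m - 1) else m

def gen_perm_alt (n : Int) : List Int :=
  baseList (findBase (n.toNat + 7) n)
    ++ PySem.List.pyRange (findBase (n.toNat + 7) n + 1) (n + 1) 1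

-- ===== PRECONDITION & SPEC =====
-- Pre_ excludes negative n, outside the function's domain (a permutation of 1..n): the list A
-- returns there is an accident of bin()'s '-' sign and of the comprehension's range being empty,
-- and is not a permutation of anything, so neither value is specified.
def Pre_gen_perm (n : Int) : Prop := 0 ≤ n
instance (n : Int) : Decidable (Pre_gen_perm n) := by unfold Pre_gen_perm; infer_instance
def pvWitness_gen_perm : Int := (6)

def Spec_gen_perm (n : Int) (out : List Int) : Prop := out = gen_perm_alt n
instance (n : Int) (out : List Int) : Decidable (Spec_gen_perm n out) := by unfold Spec_gen_perm; infer_instance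

-- ===== CLAIM (what is proved, stated in full; the proofs are below) =====
def Claim_equal_gen_perm : Prop := ∀ (n : Int), Dom_gen_perm n → Pre_gen_perm n → Spec_gen_perm n (gen_perm n)

-- ===== LEMMAS AND PROOFS =====

-- for n ≥ 2, the 'last' value satisfies 1 ≤ last ∧ last ≤ n
lemma last_bounds (n : Int) (h2 : 2 ≤ n) :
    1 ≤ (2 : Int) ^ (pyBinLen n - 3) - 1 ∧ (2 : Int) ^ (pyBinLen n - 3) - 1 ≤ n := by
  have hn0 : ¬ n < 0 := by omega
  set L := (Nat.digits 2 n.natAbs).length with hL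
  have hA : 2 ≤ n.natAbs := by omega
  have hL2 : 2 ≤ L := by
    have := (Nat.lt_digits_length_iff (b := 2) (k := 1) (by norm_num) n.natAbs).2 (by simpa using hA)
    omega
  have hLen : pyBinLen n - 3 = L - 1 := by
    simp [pyBinLen, hn0, ← hL]
    omega
  have hle : 2 ^ (L - 1) ≤ n.natAbs :=
    (Nat.lt_digits_length_iff (b := 2) (k := L - 1) (by norm_num) n.natAbs).1 (by omega)
  have h1 : (2 : Int) ^ (L - 1) = ((2 ^ (L - 1) : Nat) : Int) := by push_cast; ring
  have h2' : (2 : Nat) ^ (L - 1) ≥ 2 := by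
    calc (2 : Nat) ^ (L - 1) ≥ 2 ^ 1 := Nat.pow_le_pow_right (by norm_num) (by omega)
    _ = 2 := by norm_num
  constructor
  · rw [hLen, h1]; omega
  · rw [hLen, h1]
    have : (n.natAbs : Int) = n := Int.natAbs_of_nonneg (by omega)
    omega

-- the filtered range of A's base case equals B's two-range construction
lemma filter_eq_ranges (n last : Int) (h1 : 1 ≤ last) (h2 : last ≤ n) :
    (PySem.List.pyRange 1 (n + 1) 1).filter (fun i => i != last)
      = PySem.List.pyRange 1 last 1 ++ PySem.List.pyRange (last + 1) (n + 1) 1 := by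
  rw [PySem.List.pyRange_one_append 1 last (n + 1) h1 (by omega),
      PySem.List.pyRange_one_append last (last + 1) (n + 1) (by omega) (by omega),
      PySem.List.pyRange_one_singleton]
  rw [List.filter_append, List.filter_append]
  have ha : (PySem.List.pyRange 1 last 1).filter (fun i => i != last)
      = PySem.List.pyRange 1 last 1 := by
    apply List.filter_eq_self.mpr
    intro a ha
    rw [PySem.List.mem_pyRange_one] at ha
    simp; omega
  have hb : (PySem.List.pyRange (last + 1) (n + 1) 1).filter (fun i => i != last)
      = PySem.List.pyRange (last + 1) (n + 1) 1 := by
    apply List.filter_eq_self.mpr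
    intro a ha
    rw [PySem.List.mem_pyRange_one] at ha
    simp; omega
  rw [ha, hb]
  simp

-- the loop leaves immediately when the stopping condition holds
lemma findBase_stop (f : Nat) (m : Int)
    (h : ¬ (m ≠ 5 ∧ (m % 2 ≠ 0 ∨ pyBitCount m = 1))) : findBase (f + 1) m = m := by
  rw [findBase, if_neg h]

-- one loop iteration
lemma findBase_step (f : Nat) (m : Int)
    (h : m ≠ 5 ∧ (m % 2 ≠ 0 ∨ pyBitCount m = 1)) : findBase (f + 1) m = findBase f (m - 1) := by
  rw [findBase, if_pos h]

-- the loop only decreases its variable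
lemma findBase_le (f : Nat) : ∀ m : Int, findBase f m ≤ m := by
  induction f with
  | zero => intro m; simp [findBase]
  | succ f ih =>
    intro m
    rw [findBase]
    split
    · have := ih (m - 1); omega
    · omega

-- at a stopping index, A's base case equals B's _base
lemma stop_base (f : Nat) (n : Int) (h0 : 0 ≤ n)
    (hs : n = 5 ∨ (n % 2 = 0 ∧ pyBitCount n ≠ 1)) :
    gen_permGo (f + 1) n = baseList n := by
  rcases hs with h5 | ⟨hev, hbc⟩
  · subst h5
    rw [gen_permGo]
    simp [baseList]
  · have h5 : n ≠ 5 := by intro h; subst h; omega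
    rw [gen_permGo, if_neg h5, if_pos hev, if_neg hbc]
    by_cases hn0 : n = 0
    · subst hn0; decide
    · have h2 : 2 ≤ n := by omega
      obtain ⟨hl1, hl2⟩ := last_bounds n h2
      simp only [baseList, if_neg h5]
      rw [filter_eq_ranges n _ hl1 hl2]

-- main equivalence on 0 ≤ n, by induction reaching the stopping index
lemma A_eq_B : ∀ n : Int, 0 ≤ n → gen_perm n = gen_perm_alt n := by
  intro n hn
  induction n, hn using Int.le_induction with
  | base => decide
  | succ n hn ih =>
    have ht : (n + 1).toNat = n.toNat + 1 := by omega
    by_cases hs : (n + 1) = 5 ∨ ((n + 1) % 2 = 0 ∧ pyBitCount (n + 1) ≠ 1)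
    · have hnot : ¬ ((n + 1) ≠ 5 ∧ ((n + 1) % 2 ≠ 0 ∨ pyBitCount (n + 1) = 1)) := by
        rcases hs with h | ⟨h1, h2⟩ <;> tauto
      rw [gen_perm, gen_perm_alt, ht, findBase_stop _ _ hnot,
          stop_base _ _ (by omega) hs, PySem.List.pyRange_one_eq_nil (by omega)]
      simp
    · have hcond : (n + 1) ≠ 5 ∧ ((n + 1) % 2 ≠ 0 ∨ pyBitCount (n + 1) = 1) := by
        push Not at hs
        refine ⟨hs.1, ?_⟩
        by_cases h : (n + 1) % 2 = 0
        · exact Or.inr (by have := hs.2 h; tauto)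
        · exact Or.inl h
      have hsub : n + 1 - 1 = n := by ring
      have hA : gen_perm (n + 1) = gen_perm n ++ [n + 1] := by
        rw [gen_perm, gen_perm, ht, gen_permGo, if_neg hcond.1]
        by_cases hev : (n + 1) % 2 = 0
        · have hbc : pyBitCount (n + 1) = 1 := by
            rcases hcond.2 with h | h
            · exact absurd hev h
            · exact h
          rw [if_pos hev, if_pos hbc, hsub]
        · rw [if_neg hev, hsub]
      have hm : findBase ((n + 1).toNat + 7) (n + 1) = findBase (n.toNat + 7) n := by
        rw [ht, findBase_step _ _ hcond, hsub]
      have hmle : findBase (n.toNat + 7) n ≤ n := findBase_le _ n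
      have hB : gen_perm_alt (n + 1) = gen_perm_alt n ++ [n + 1] := by
        rw [gen_perm_alt, gen_perm_alt, hm,
            PySem.List.pyRange_one_append (findBase (n.toNat + 7) n + 1) (n + 1) (n + 1 + 1)
              (by omega) (by omega),
            PySem.List.pyRange_one_singleton]
        simp
      rw [hA, hB, ih]

-- ===== VERDICT (by name: the statement is the Claim_ definition above) =====
theorem gen_perm_spec : Claim_equal_gen_perm := by
  intro n _ hpre
  exact A_eq_B n hpre
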